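-- pv_equiv track=rewrite | github.com/dlahtou/python-practice | Exercise 24 (draw a game board).py | linebuilder
-- ===== SOURCE A (Python) =====
-- def linebuilder(size):
-- 	horizontal = ""
-- 	vertical = ""
-- 	for number in range(0,size+1):
-- 		vertical += "|   "
-- 		if number == 0:
-- 			continue
-- 		horizontal += " ---"
-- 	return {'horizontal':horizontal, 'vertical':vertical}
-- ===== SOURCE B (Python) =====
-- def linebuilder(size):
--     # closed form: no loop, no accumulation; negative repeat counts give ""
--     return {'horizontal': " ---" * size, 'vertical': "|   " * (size + 1)}
-- ===== Notes on version B (the rewrite author's own statement) =====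
-- stated objective: simpler
-- what changed: Replaces the accumulation loop with a skip branch by closed-form string multiplication of the two board segments.
import Mathlib
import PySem

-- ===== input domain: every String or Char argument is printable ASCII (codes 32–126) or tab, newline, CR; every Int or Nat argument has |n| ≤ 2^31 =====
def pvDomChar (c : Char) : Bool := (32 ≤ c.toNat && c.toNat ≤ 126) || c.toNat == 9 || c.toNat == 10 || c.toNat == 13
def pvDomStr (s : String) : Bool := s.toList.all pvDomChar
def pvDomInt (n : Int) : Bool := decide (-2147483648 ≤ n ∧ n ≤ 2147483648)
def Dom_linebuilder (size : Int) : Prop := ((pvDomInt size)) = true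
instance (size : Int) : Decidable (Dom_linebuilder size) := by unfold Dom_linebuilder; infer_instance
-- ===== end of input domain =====

-- B replaces A's accumulation loop with a closed-form string multiplication (same values, no loop).

-- ===== PORT A =====
-- the loop body: vertical += "|   " always; 'continue' skips horizontal += " ---" when number == 0
def linebuilderStep (acc : List Char × List Char) (number : Int) : List Char × List Char :=
  let vertical := acc.2 ++ "|   ".toList
  if number == 0 then (acc.1, vertical)
  else (acc.1 ++ " ---".toList, vertical)

def linebuilder (size : Int) : List (String × String) :=
  let st := (PySem.List.pyRange 0 (size + 1) 1).foldl linebuilderStep ([], [])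
  [("horizontal", String.ofList st.1), ("vertical", String.ofList st.2)]

-- ===== PORT B =====
-- " ---" * size and "|   " * (size + 1); a negative repeat count yields "" (Int.toNat clamps to 0)
def linebuilder_alt (size : Int) : List (String × String) :=
  [("horizontal", String.ofList (List.replicate size.toNat " ---".toList).flatten),
   ("vertical",   String.ofList (List.replicate (size + 1).toNat "|   ".toList).flatten)]

-- ===== PRECONDITION & SPEC =====
def Spec_linebuilder (size : Int) (out : List (String × String)) : Prop := out = linebuilder_alt size
instance (size : Int) (out : List (String × String)) : Decidable (Spec_linebuilder size out) := by unfold Spec_linebuilder; infer_instance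

-- ===== CLAIM (what is proved, stated in full; the proofs are below) =====
def Claim_equal_linebuilder : Prop := ∀ (size : Int), Dom_linebuilder size → Spec_linebuilder size (linebuilder size)

-- ===== LEMMAS AND PROOFS =====

-- the loop over range(0, n+1) produces exactly n copies of " ---" and n+1 copies of "|   "
lemma linebuilder_fold (n : Nat) :
    (PySem.List.pyRange 0 ((n : Int) + 1) 1).foldl linebuilderStep ([], []) =
      ((List.replicate n " ---".toList).flatten, (List.replicate (n + 1) "|   ".toList).flatten) := by
  induction n with
  | zero =>
      rw [PySem.List.pyRange_one_cons (by omega), PySem.List.pyRange_one_eq_nil (by omega)]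
      simp [linebuilderStep]
  | succ k ih =>
      have h : ((k + 1 : Nat) : Int) + 1 = ((k : Int) + 1) + 1 := by push_cast; ring
      rw [h, PySem.List.pyRange_one_succ_right (by omega), List.foldl_append, ih]
      have hne : ((k : Int) + 1) ≠ 0 := by omega
      simp [linebuilderStep, hne, List.replicate_succ' (n := k + 1), List.replicate_succ' (n := k)]

theorem linebuilder_spec_aux (size : Int) :
    linebuilder size = linebuilder_alt size := by
  rcases le_or_gt 0 size with hpos | hneg
  · obtain ⟨n, rfl⟩ := Int.eq_ofNat_of_zero_le hpos
    simp [linebuilder, linebuilder_alt, linebuilder_fold n]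
  · have h1 : PySem.List.pyRange 0 (size + 1) 1 = [] :=
      PySem.List.pyRange_one_eq_nil (by omega)
    have h2 : size.toNat = 0 := by omega
    have h3 : (size + 1).toNat = 0 := by omega
    simp [linebuilder, linebuilder_alt, h1, h2, h3]

-- ===== VERDICT (by name: the statement is the Claim_ definition above) =====
theorem linebuilder_spec : Claim_equal_linebuilder := by
  intro size _
  exact linebuilder_spec_aux size
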